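-- pv_equiv track=rewrite | github.com/KosinskiLab/AlphaPulldown | test/unit/test_af2_to_af3_msa.py | _aligned_and_deletions
-- ===== SOURCE A (Python) =====
-- def _aligned_and_deletions(sequence: str) -> tuple[str, list[int]]:
--     aligned_chars = []
--     deletion_counts = []
--     pending_deletions = 0
--     for residue in sequence:
--         if residue.islower():
--             pending_deletions += 1
--             continue
--         aligned_chars.append(residue)
--         deletion_counts.append(pending_deletions)
--         pending_deletions = 0
--     return "".join(aligned_chars), deletion_counts
-- ===== SOURCE B (Python) =====
-- def _aligned_and_deletions(sequence: str) -> tuple[str, list[int]]: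
--     # Run-based scan: consume maximal lowercase / non-lowercase runs instead of
--     # one character at a time.
--     aligned = []
--     deletions = []
--     pending = 0
--     i, n = 0, len(sequence)
--     while i < n:
--         j = i + 1
--         if sequence[i].islower():
--             while j < n and sequence[j].islower():
--                 j += 1
--             pending += j - i
--         else:
--             while j < n and not sequence[j].islower():
--                 j += 1
--             aligned.append(sequence[i:j])
--             deletions.append(pending)
--             deletions.extend([0] * (j - i - 1))
--             pending = 0
--         i = j
--     return "".join(aligned), deletions
-- ===== Notes on version B (the rewrite author's own statement) =====
-- stated objective: alternative
-- what changed: B scans the string as maximal lowercase/non-lowercase runs (slicing a whole run per iteration and emitting the pending count once per run) instead of A's per-character loop with an islower test and per-character appends.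
import Mathlib
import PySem

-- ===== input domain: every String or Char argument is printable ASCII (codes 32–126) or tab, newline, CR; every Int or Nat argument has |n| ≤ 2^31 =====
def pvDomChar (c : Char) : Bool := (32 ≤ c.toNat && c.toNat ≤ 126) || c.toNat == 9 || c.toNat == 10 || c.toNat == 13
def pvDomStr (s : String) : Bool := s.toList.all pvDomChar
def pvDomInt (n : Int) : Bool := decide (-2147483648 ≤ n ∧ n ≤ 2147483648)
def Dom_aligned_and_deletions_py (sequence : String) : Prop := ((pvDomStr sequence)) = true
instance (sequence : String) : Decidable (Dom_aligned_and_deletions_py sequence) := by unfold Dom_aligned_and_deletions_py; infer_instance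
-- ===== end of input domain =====

-- B scans maximal lowercase/non-lowercase runs instead of A's per-character loop; alternative decomposition, same return value.


-- ===== PORT A =====
-- per-character fold over the string, state = (aligned_chars, deletion_counts, pending_deletions)
def aStep (st : List Char × List Int × Int) (c : Char) : List Char × List Int × Int :=
  if PySem.Chars.islower c then (st.1, st.2.1, st.2.2 + 1)
  else (st.1 ++ [c], st.2.1 ++ [st.2.2], 0)

def aligned_and_deletions_py (sequence : String) : String × List Int :=
  let st := sequence.toList.foldl aStep ([], [], 0)
  (String.ofList st.1, st.2.1)

-- ===== PORT B =====
-- consume one maximal run per call: a lowercase run adds its length to pending,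
-- a non-lowercase run is emitted with `pending` on its first character and 0 after.
def bGo (pending : Int) (cs : List Char) : List Char × List Int :=
  match cs with
  | [] => ([], [])
  | c :: cs' =>
    if PySem.Chars.islower c then
      bGo (pending + 1 + (cs'.takeWhile (fun d => PySem.Chars.islower d)).length)
          (cs'.dropWhile (fun d => PySem.Chars.islower d))
    else
      let up := cs'.takeWhile (fun d => !PySem.Chars.islower d)
      let rest := cs'.dropWhile (fun d => !PySem.Chars.islower d)
      let ad := bGo 0 rest
      (c :: up ++ ad.1, pending :: List.replicate up.length 0 ++ ad.2)
termination_by cs.length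
decreasing_by
  · have := List.length_dropWhile_le (fun d => PySem.Chars.islower d) cs'
    simpa using Nat.lt_succ_of_le this
  · have := List.length_dropWhile_le (fun d => !PySem.Chars.islower d) cs'
    simpa using Nat.lt_succ_of_le this

def aligned_and_deletions_py_alt (sequence : String) : String × List Int :=
  let ad := bGo 0 sequence.toList
  (String.ofList ad.1, ad.2)

-- ===== PRECONDITION & SPEC =====
def Spec_aligned_and_deletions_py (sequence : String) (out : String × List Int) : Prop := out = aligned_and_deletions_py_alt sequence
instance (sequence : String) (out : String × List Int) : Decidable (Spec_aligned_and_deletions_py sequence out) := by unfold Spec_aligned_and_deletions_py; infer_instance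

-- ===== CLAIM (what is proved, stated in full; the proofs are below) =====
def Claim_equal_aligned_and_deletions_py : Prop := ∀ (sequence : String), Dom_aligned_and_deletions_py sequence → Spec_aligned_and_deletions_py sequence (aligned_and_deletions_py sequence)

-- ===== LEMMAS AND PROOFS =====

-- one-character step lemmas for bGo
theorem bGo_cons_lower (p : Int) (c : Char) (cs : List Char)
    (h : PySem.Chars.islower c = true) :
    bGo p (c :: cs) = bGo (p + 1) cs := by
  rw [bGo, if_pos h]
  match cs with
  | [] => simp [bGo]
  | d :: cs' =>
    by_cases hd : PySem.Chars.islower d = true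
    · conv_rhs => rw [bGo]
      rw [if_pos hd]
      simp [List.takeWhile, List.dropWhile, hd]
      ring_nf
    · simp [List.takeWhile, List.dropWhile, hd]

theorem bGo_cons_upper (p : Int) (c : Char) (cs : List Char)
    (h : ¬ PySem.Chars.islower c = true) :
    bGo p (c :: cs) = (c :: (bGo 0 cs).1, p :: (bGo 0 cs).2) := by
  rw [bGo, if_neg h]
  match cs with
  | [] => simp [bGo]
  | d :: cs' =>
    by_cases hd : PySem.Chars.islower d = true
    · simp [List.takeWhile, List.dropWhile, hd, bGo]
    · conv_rhs => rw [bGo]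
      rw [if_neg hd]
      simp [List.takeWhile, List.dropWhile, hd, List.replicate_succ]

-- the fold of A, started in an arbitrary state, produces B's run-based result
theorem key (cs : List Char) : ∀ (ac : List Char) (dc : List Int) (p : Int),
    ((cs.foldl aStep (ac, dc, p)).1, (cs.foldl aStep (ac, dc, p)).2.1)
      = (ac ++ (bGo p cs).1, dc ++ (bGo p cs).2) := by
  induction cs with
  | nil => intro ac dc p; simp [bGo]
  | cons c cs ih =>
    intro ac dc p
    by_cases h : PySem.Chars.islower c = true
    · rw [bGo_cons_lower p c cs h]
      simpa [aStep, h] using ih ac dc (p + 1)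
    · rw [bGo_cons_upper p c cs h]
      simpa [aStep, h] using ih (ac ++ [c]) (dc ++ [p]) 0

-- ===== VERDICT (by name: the statement is the Claim_ definition above) =====
theorem aligned_and_deletions_py_spec : Claim_equal_aligned_and_deletions_py := by
  intro s _
  unfold Spec_aligned_and_deletions_py aligned_and_deletions_py aligned_and_deletions_py_alt
  have h := key s.toList [] [] 0
  simp only [List.nil_append] at h
  simp [Prod.ext_iff] at h ⊢
  exact ⟨congrArg String.ofList h.1, h.2⟩
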